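-- pv_equiv track=rewrite | github.com/matheusbon/Listas-P1 | (Lista4)_Funções_e_Escopo_de_Variável/A caminho de Shichikokuyama.py | ordem
-- ===== SOURCE A (Python) =====
-- def comparador(a, b):
--     return a == b
--
-- def ordem(_silabas):
--     ordem = False
--     ultimo_index = 0
--     atual_index = 0
--     cont = 0
--     while cont < len(_silabas):
--         if cont == 0:
--             ultimo_index = nome_hospital.index(_silabas[cont])
--         else:
--             atual_index = nome_hospital.index(_silabas[cont])
--
--             ordem = comparador(ultimo_index, atual_index - 1)
--
--             ultimo_index = atual_index
--         cont += 1
--     return ordem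
--
-- nome_hospital = ['shi', 'chi', 'ko', 'ku', 'ya', 'ma']
-- ===== SOURCE B (Python) =====
-- nome_hospital = ['shi', 'chi', 'ko', 'ku', 'ya', 'ma']
--
-- def ordem(_silabas):
--     idx = [nome_hospital.index(s) for s in _silabas]
--     return len(idx) >= 2 and idx[-2] == idx[-1] - 1
-- ===== Notes on version B (the rewrite author's own statement) =====
-- stated objective: simpler
-- what changed: B builds the full index list in one comprehension (keeping .index so unknown syllables still raise ValueError) and makes the single decision idx[-2] == idx[-1] - 1, instead of A's while loop that tracks ultimo/atual and overwrites the result every iteration.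
import Mathlib
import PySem

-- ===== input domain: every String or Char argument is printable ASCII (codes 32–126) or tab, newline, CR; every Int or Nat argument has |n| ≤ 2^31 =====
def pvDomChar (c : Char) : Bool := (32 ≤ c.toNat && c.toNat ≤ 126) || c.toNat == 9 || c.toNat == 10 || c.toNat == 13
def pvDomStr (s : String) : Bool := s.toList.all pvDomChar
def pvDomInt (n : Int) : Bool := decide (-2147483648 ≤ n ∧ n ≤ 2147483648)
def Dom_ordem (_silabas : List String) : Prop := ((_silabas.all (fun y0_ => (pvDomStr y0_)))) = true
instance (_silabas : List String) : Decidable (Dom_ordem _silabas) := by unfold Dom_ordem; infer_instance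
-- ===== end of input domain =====

-- ===== PORT A =====
-- B changes only the decomposition: one index-building pass then a single comparison; return value equal to A on all inputs where A returns (no unknown syllables).
def nome_hospital : List String := ["shi", "chi", "ko", "ku", "ya", "ma"]

def comparador (a b : Int) : Bool := a == b

-- nome_hospital.index(x): ValueError (excluded by Pre_) becomes the unused default 0
def hidx (x : String) : Int := ((PySem.List.index? nome_hospital x).getD 0 : Nat)

def ordemLoop (l : List String) (ord : Bool) (ultimo atual : Int) (cont : Nat) : Bool :=
  if h : cont < l.length then
    if cont = 0 then
      ordemLoop l ord (hidx l[cont]) atual (cont + 1)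
    else
      let atual' := hidx l[cont]
      ordemLoop l (comparador ultimo (atual' - 1)) atual' atual' (cont + 1)
  else ord
termination_by l.length - cont

def ordem (_silabas : List String) : Bool :=
  ordemLoop _silabas false 0 0 0

-- ===== PORT B =====
def ordem_alt (_silabas : List String) : Bool :=
  let idx := _silabas.map (fun s => ((PySem.List.index? nome_hospital s).getD 0 : Int))
  decide (2 ≤ idx.length) &&
    ((PySem.List.pyGet? idx (-2)).getD 0 == (PySem.List.pyGet? idx (-1)).getD 0 - 1)

-- ===== PRECONDITION & SPEC =====
-- Pre_ excludes exactly the inputs containing a syllable not in nome_hospital, on which A raises ValueError.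
def Pre_ordem (_silabas : List String) : Prop := ∀ s ∈ _silabas, s ∈ nome_hospital
instance (_silabas : List String) : Decidable (Pre_ordem _silabas) := by unfold Pre_ordem; infer_instance
def pvWitness_ordem : List String := (["shi", "chi"])
def Spec_ordem (_silabas : List String) (out : Bool) : Prop := out = ordem_alt _silabas
instance (_silabas : List String) (out : Bool) : Decidable (Spec_ordem _silabas out) := by unfold Spec_ordem; infer_instance

-- ===== CLAIM (what is proved, stated in full; the proofs are below) =====
def Claim_equal_ordem : Prop := ∀ (_silabas : List String), Dom_ordem _silabas → Pre_ordem _silabas → Spec_ordem _silabas (ordem _silabas)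

-- ===== LEMMAS AND PROOFS =====
lemma ordemLoop_eq (l : List String) : ∀ (k cont : Nat) (ord : Bool) (ultimo atual : Int),
    l.length - cont = k → 1 ≤ cont → cont < l.length →
    ultimo = hidx (l.getD (cont - 1) "") →
    ordemLoop l ord ultimo atual cont =
      comparador (hidx (l.getD (l.length - 2) "")) (hidx (l.getD (l.length - 1) "") - 1) := by
  intro k
  induction k with
  | zero => intro cont ord ultimo atual hk h1 h2 hu; omega
  | succ k ih =>
    intro cont ord ultimo atual hk h1 h2 hu
    rw [ordemLoop]
    simp only [h2, dif_pos]
    have hc0 : ¬ cont = 0 := by omega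
    simp only [hc0, if_false]
    by_cases hlast : cont + 1 < l.length
    · rw [ih (cont + 1) _ _ _ (by omega) (by omega) hlast (by simp [List.getD, List.getElem?_eq_getElem h2])]
    · rw [ordemLoop]
      simp only [show ¬ cont + 1 < l.length from hlast, dif_neg, not_false_iff]
      have hg : l[cont] = l.getD cont "" := by
        simp [List.getD, List.getElem?_eq_getElem h2]
      rw [hu, hg, show cont - 1 = l.length - 2 by omega, show cont = l.length - 1 by omega]

lemma hidx_getD_eq (l : List String) (i : Nat) (h : i < l.length) :
    ((l.map (fun s => ((PySem.List.index? nome_hospital s).getD 0 : Int)))[i]?).getD 0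
      = hidx ((l[i]?).getD "") := by
  simp [List.getElem?_eq_getElem h, List.getElem?_map, hidx]

-- ===== VERDICT (by name: the statement is the Claim_ definition above) =====
theorem ordem_spec : Claim_equal_ordem := by
  intro l _ _
  unfold Spec_ordem ordem ordem_alt
  match hl : l with
  | [] => simp [ordemLoop]
  | [x] => simp [ordemLoop]
  | x :: y :: rest =>
    set l' := x :: y :: rest with hl'
    have hlen : 2 ≤ l'.length := by simp [hl']
    rw [show ordemLoop l' false 0 0 0 = ordemLoop l' false (hidx l'[0]) 0 1 by
          rw [ordemLoop]
          rw [dif_pos (show 0 < l'.length from by omega)]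
          simp]
    rw [ordemLoop_eq l' (l'.length - 1) 1 false (hidx l'[0]) 0 (by omega) (le_refl 1)
        (by omega) (by rfl)]
    set idx := l'.map (fun s => ((PySem.List.index? nome_hospital s).getD 0 : Int)) with hidxdef
    have hil : idx.length = l'.length := by simp [hidxdef]
    have h2 : PySem.List.pyGet? idx (-2) = idx[idx.length - 2]? := by
      exact PySem.List.pyGet?_neg_ofNat idx 2 (by omega) (by omega)
    have h1 : PySem.List.pyGet? idx (-1) = idx[idx.length - 1]? := by
      exact PySem.List.pyGet?_neg_ofNat idx 1 (by omega) (by omega)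
    have e2 : (idx[l'.length - 2]?).getD 0 = hidx ((l'[l'.length - 2]?).getD "") :=
      hidx_getD_eq l' (l'.length - 2) (by omega)
    have e1 : (idx[l'.length - 1]?).getD 0 = hidx ((l'[l'.length - 1]?).getD "") :=
      hidx_getD_eq l' (l'.length - 1) (by omega)
    simp only [List.getD] at *
    simp [h2, h1, hil, hlen, comparador]
    rw [e2, e1]
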